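-- pv_equiv track=rewrite | github.com/bishal5917/LeetCoding | Python/WhichYrWhichDay.py | WhichYrWhichDay
-- ===== SOURCE A (Python) =====
-- def WhichYrWhichDay(yr):
--
--     days = [
--         "Monday",
--         "Tuesday",
--         "Wednesday",
--         "Thursday",
--         "Friday",
--         "Saturday",
--         "Sunday",
--         "None",
--     ]
--     day = 0
--     start = 1
--     while start != yr:
--         if CheckleapYear(start):
--             day += 2
--             if day == 7:
--                 day = 0
--             if day == 8:
--                 day = 1
--             start += 1
--         else:
--             day += 1
--             if day >= 7:
--                 day = 0
--             start += 1
--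
--     return days[day]
--
-- def CheckleapYear(year):
--     if (year % 400 == 0) and (year % 100 == 0):
--         return True
--     elif (year % 4 == 0) and (year % 100 != 0):
--         return True
--     else:
--         return False
-- ===== SOURCE B (Python) =====
-- def WhichYrWhichDay(yr):
--     days = [
--         "Monday",
--         "Tuesday",
--         "Wednesday",
--         "Thursday",
--         "Friday",
--         "Saturday",
--         "Sunday",
--         "None",
--     ]
--     n = yr - 1
--     leaps = n // 4 - n // 100 + n // 400
--     return days[(n + leaps) % 7]
-- ===== Notes on version B (the rewrite author's own statement) =====
-- stated objective: faster
-- what changed: Replaced the O(yr) year-by-year offset loop by the closed form day = (yr-1 + (yr-1)//4 - (yr-1)//100 + (yr-1)//400) mod 7 with O(1) leap counting; Pre_ requires yr >= 1 because A's while-loop never terminates for yr <= 0.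
import Mathlib
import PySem

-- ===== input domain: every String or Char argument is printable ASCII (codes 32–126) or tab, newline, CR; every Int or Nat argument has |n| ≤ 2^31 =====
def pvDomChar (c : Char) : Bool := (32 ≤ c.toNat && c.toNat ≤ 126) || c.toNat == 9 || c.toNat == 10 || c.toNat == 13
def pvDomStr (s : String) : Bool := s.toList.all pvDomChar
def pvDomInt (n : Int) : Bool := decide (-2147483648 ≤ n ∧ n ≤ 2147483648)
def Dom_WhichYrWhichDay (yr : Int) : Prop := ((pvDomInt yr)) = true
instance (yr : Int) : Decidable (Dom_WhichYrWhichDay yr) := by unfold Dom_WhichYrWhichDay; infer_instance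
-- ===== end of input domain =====

-- B replaces A's O(yr) year-by-year offset loop by a closed-form O(1) leap count: faster (asymptotic).

-- ===== PORT A =====
def pvDaysA : List String :=
  ["Monday", "Tuesday", "Wednesday", "Thursday", "Friday", "Saturday", "Sunday", "None"]

def CheckleapYear (year : Int) : Bool :=
  if PySem.Int.mod year 400 == 0 && PySem.Int.mod year 100 == 0 then true
  else if PySem.Int.mod year 4 == 0 && !(PySem.Int.mod year 100 == 0) then true
  else false

-- A's while-loop; the `start < yr` test is only a totality guard (Python diverges when start > yr,
-- which Pre_ excludes since the loop starts at 1).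
def pvLoopA (yr day start : Int) : Int :=
  if start = yr then day
  else
    let day' :=
      if CheckleapYear start then
        let d := day + 2
        let d := if d = 7 then 0 else d
        if d = 8 then 1 else d
      else
        let d := day + 1
        if d ≥ 7 then 0 else d
    if _h : start < yr then pvLoopA yr day' (start + 1) else day'
termination_by (yr - start).toNat
decreasing_by omega

def WhichYrWhichDay (yr : Int) : String :=
  (PySem.List.pyGet? pvDaysA (pvLoopA yr 0 1)).getD ""

-- ===== PORT B =====
def pvDaysB : List String :=
  ["Monday", "Tuesday", "Wednesday", "Thursday", "Friday", "Saturday", "Sunday", "None"]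

def WhichYrWhichDay_alt (yr : Int) : String :=
  let n := yr - 1
  let leaps := PySem.Int.floordiv n 4 - PySem.Int.floordiv n 100 + PySem.Int.floordiv n 400
  (PySem.List.pyGet? pvDaysB (PySem.Int.mod (n + leaps) 7)).getD ""

-- ===== PRECONDITION & SPEC =====
-- Pre_ excludes yr ≤ 0, where A's `while start != yr` loop (counting up from 1) never terminates.
def Pre_WhichYrWhichDay (yr : Int) : Prop := 1 ≤ yr
instance (yr : Int) : Decidable (Pre_WhichYrWhichDay yr) := by unfold Pre_WhichYrWhichDay; infer_instance
def pvWitness_WhichYrWhichDay : Int := (2024)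

def Spec_WhichYrWhichDay (yr : Int) (out : String) : Prop := out = WhichYrWhichDay_alt yr
instance (yr : Int) (out : String) : Decidable (Spec_WhichYrWhichDay yr out) := by unfold Spec_WhichYrWhichDay; infer_instance

-- ===== CLAIM (what is proved, stated in full; the proofs are below) =====
def Claim_equal_WhichYrWhichDay : Prop := ∀ (yr : Int), Dom_WhichYrWhichDay yr → Pre_WhichYrWhichDay yr → Spec_WhichYrWhichDay yr (WhichYrWhichDay yr)

-- ===== LEMMAS AND PROOFS =====

-- cumulative leap count: number of leap years in 1..n (for n ≥ 0)
def pvF (n : Int) : Int := n / 4 - n / 100 + n / 400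

lemma pvDivStep4 (s : Int) : s / 4 - (s - 1) / 4 = if s % 4 = 0 then 1 else 0 := by
  split_ifs <;> omega

lemma pvDivStep100 (s : Int) : s / 100 - (s - 1) / 100 = if s % 100 = 0 then 1 else 0 := by
  split_ifs <;> omega

lemma pvDivStep400 (s : Int) : s / 400 - (s - 1) / 400 = if s % 400 = 0 then 1 else 0 := by
  split_ifs <;> omega

lemma pvLeap_step (s : Int) (_ : 1 ≤ s) :
    pvF s - pvF (s - 1) = (if CheckleapYear s then 2 else 1) - 1 := by
  have h400 : PySem.Int.mod s 400 = s % 400 := PySem.Int.mod_eq_emod_of_pos (by omega)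
  have h100 : PySem.Int.mod s 100 = s % 100 := PySem.Int.mod_eq_emod_of_pos (by omega)
  have h4 : PySem.Int.mod s 4 = s % 4 := PySem.Int.mod_eq_emod_of_pos (by omega)
  have key : pvF s - pvF (s - 1)
      = (if s % 4 = 0 then (1:Int) else 0) - (if s % 100 = 0 then 1 else 0)
        + (if s % 400 = 0 then 1 else 0) := by
    rw [← pvDivStep4 s, ← pvDivStep100 s, ← pvDivStep400 s]
    simp only [pvF]
    ring
  rw [key]
  unfold CheckleapYear
  rw [h400, h100, h4]
  by_cases c4 : s % 4 = 0 <;> by_cases c100 : s % 100 = 0 <;> by_cases c400 : s % 400 = 0 <;>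
    simp [c4, c100, c400] <;> omega

lemma pvLoopA_closed : ∀ (k : Nat) (yr day start : Int),
    (yr - start).toNat = k → 1 ≤ start → start ≤ yr → 0 ≤ day → day < 7 →
    pvLoopA yr day start = (day + (yr - start) + pvF (yr - 1) - pvF (start - 1)) % 7 := by
  intro k
  induction k with
  | zero =>
    intro yr day start hk h1 h2 hd0 hd7
    have : start = yr := by omega
    subst this
    rw [pvLoopA]
    simp
    omega
  | succ k ih =>
    intro yr day start hk h1 h2 hd0 hd7
    have hne : start ≠ yr := by omega
    have hlt : start < yr := by omega
    rw [pvLoopA]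
    simp only [if_neg hne, dif_pos hlt]
    have hstep := pvLeap_step start h1
    have e1 : start + 1 - 1 = start := by omega
    by_cases hc : CheckleapYear start
    · simp only [hc, if_true] at hstep ⊢
      split_ifs with h7 h8 <;>
      · rw [ih yr _ (start + 1) (by omega) (by omega) (by omega) (by omega) (by omega), e1]
        omega
    · simp only [hc, if_false, Bool.false_eq_true] at hstep ⊢
      split_ifs with h7 <;>
      · rw [ih yr _ (start + 1) (by omega) (by omega) (by omega) (by omega) (by omega), e1]
        omega

-- ===== VERDICT (by name: the statement is the Claim_ definition above) =====
theorem WhichYrWhichDay_spec : Claim_equal_WhichYrWhichDay := by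
  intro yr _ hpre
  have hyr : (1 : Int) ≤ yr := hpre
  unfold Spec_WhichYrWhichDay WhichYrWhichDay WhichYrWhichDay_alt
  rw [pvLoopA_closed (yr - 1).toNat yr 0 1 (by omega) (by omega) hyr (by omega) (by omega)]
  have hf4 : PySem.Int.floordiv (yr - 1) 4 = (yr - 1) / 4 := PySem.Int.floordiv_eq_ediv_of_pos (by omega)
  have hf100 : PySem.Int.floordiv (yr - 1) 100 = (yr - 1) / 100 := PySem.Int.floordiv_eq_ediv_of_pos (by omega)
  have hf400 : PySem.Int.floordiv (yr - 1) 400 = (yr - 1) / 400 := PySem.Int.floordiv_eq_ediv_of_pos (by omega)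
  have hm : ∀ a : Int, PySem.Int.mod a 7 = a % 7 := fun a => PySem.Int.mod_eq_emod_of_pos (by omega)
  simp only [hf4, hf100, hf400, hm]
  have hidx : (0 + (yr - 1) + pvF (yr - 1) - pvF (1 - 1)) % 7
       = (yr - 1 + ((yr - 1) / 4 - (yr - 1) / 100 + (yr - 1) / 400)) % 7 := by
    simp only [pvF]
    omega
  rw [hidx]
  rfl
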